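-- pv_equiv track=rewrite | github.com/AlgoMathITMO/public-transport-network | ptn/preprocessing/osm.py | is_catering_place
-- ===== SOURCE A (Python) =====
-- from typing import List, Tuple, Dict, Optional, Set
--
-- def is_any_pair_present(tags: dict, items: List[Tuple[str, str]]) -> bool:
--     return isinstance(tags, dict) \
--            and any((key, value) in items for key, value in tags.items())
--
-- def is_catering_place(tags: dict) -> bool:
--     items = [
--         ('shop', 'pastry'),
--         ('shop', 'bakery'),
--     ]
--
--     items += [('amenity', val) for val in ['restaurant', 'cafe', 'fast_food', 'bakery',
--                                            'bar', 'nightclub', 'internet_cafe', 'pub']]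
--
--     return is_any_pair_present(tags, items)
-- ===== SOURCE B (Python) =====
-- def is_catering_place(tags: dict) -> bool:
--     if not isinstance(tags, dict):
--         return False
--     catalogue = {
--         'shop': ('pastry', 'bakery'),
--         'amenity': ('restaurant', 'cafe', 'fast_food', 'bakery',
--                     'bar', 'nightclub', 'internet_cafe', 'pub'),
--     }
--     return any(tags.get(key) in vals for key, vals in catalogue.items())
-- ===== Notes on version B (the rewrite author's own statement) =====
-- stated objective: simpler
-- what changed: Instead of building the full list of (key,value) pairs and scanning every tag against it, B loops over a fixed 2-entry catalogue keyed by tag key and checks tags.get(key) against the allowed values, so the tags dict is never iterated.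
import Mathlib
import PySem

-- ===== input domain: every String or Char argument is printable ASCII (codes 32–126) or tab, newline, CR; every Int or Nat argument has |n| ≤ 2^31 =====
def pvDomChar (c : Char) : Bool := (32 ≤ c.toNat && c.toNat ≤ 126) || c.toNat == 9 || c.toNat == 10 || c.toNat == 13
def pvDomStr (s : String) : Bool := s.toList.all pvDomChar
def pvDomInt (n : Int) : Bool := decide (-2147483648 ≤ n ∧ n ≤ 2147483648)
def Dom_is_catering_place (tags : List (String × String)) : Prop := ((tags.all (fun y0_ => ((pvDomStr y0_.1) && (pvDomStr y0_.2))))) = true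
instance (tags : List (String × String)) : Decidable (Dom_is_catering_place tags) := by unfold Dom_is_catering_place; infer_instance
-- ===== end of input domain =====

-- B replaces A's scan of all tags against a 10-pair list by two keyed lookups into a
-- fixed catalogue (objective: simpler). Equivalence is proved for association lists with
-- distinct keys — exactly the lists that represent a Python dict.


-- ===== PORT A =====
-- items = [('shop','pastry'),('shop','bakery')] + [('amenity', v) for v in [...]]
def pvItems_is_catering_place : List (String × String) :=
  [("shop", "pastry"), ("shop", "bakery")] ++
    (["restaurant", "cafe", "fast_food", "bakery", "bar", "nightclub",
      "internet_cafe", "pub"].map (fun v => ("amenity", v)))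

-- is_any_pair_present: isinstance(tags, dict) is always true under the type convention;
-- any((key, value) in items for key, value in tags.items())
def pv_is_any_pair_present (tags : List (String × String)) (items : List (String × String)) : Bool :=
  tags.any (fun kv => items.contains kv)

def is_catering_place (tags : List (String × String)) : Bool :=
  pv_is_any_pair_present tags pvItems_is_catering_place

-- ===== PORT B =====
-- tags.get(key): first match in the association list (a dict has unique keys)
def pvGetTag (tags : List (String × String)) (k : String) : Option String :=
  (tags.find? (fun kv => kv.1 == k)).map (·.2)

-- `tags.get(key) in vals` (None is never in vals, which hold only strings)
def pvInVals (o : Option String) (vals : List String) : Bool :=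
  match o with
  | some v => vals.contains v
  | none => false

def pvCatalogue_is_catering_place : List (String × List String) :=
  [("shop", ["pastry", "bakery"]),
   ("amenity", ["restaurant", "cafe", "fast_food", "bakery", "bar", "nightclub",
                "internet_cafe", "pub"])]

def is_catering_place_alt (tags : List (String × String)) : Bool :=
  pvCatalogue_is_catering_place.any (fun kv => pvInVals (pvGetTag tags kv.1) kv.2)

-- ===== PRECONDITION & SPEC =====
-- Pre_ requires distinct keys: the Python argument is a dict, whose keys are unique; an
-- association list with a repeated key represents no dict, so nothing is claimed there.
def Pre_is_catering_place (tags : List (String × String)) : Prop :=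
  (tags.map Prod.fst).Nodup

instance (tags : List (String × String)) : Decidable (Pre_is_catering_place tags) := by
  unfold Pre_is_catering_place; infer_instance

def pvWitness_is_catering_place : (List (String × String)) :=
  [("amenity", "cafe"), ("name", "Blue Cup")]

def Spec_is_catering_place (tags : List (String × String)) (out : Bool) : Prop := out = is_catering_place_alt tags
instance (tags : List (String × String)) (out : Bool) : Decidable (Spec_is_catering_place tags out) := by unfold Spec_is_catering_place; infer_instance

-- ===== CLAIM (what is proved, stated in full; the proofs are below) =====
def Claim_equal_is_catering_place : Prop := ∀ (tags : List (String × String)), Dom_is_catering_place tags → Pre_is_catering_place tags → Spec_is_catering_place tags (is_catering_place tags)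

-- ===== LEMMAS AND PROOFS =====

theorem pvGetTag_cons (k v key : String) (rest : List (String × String)) :
    pvGetTag ((k, v) :: rest) key = if k = key then some v else pvGetTag rest key := by
  by_cases h : k = key <;> simp [pvGetTag, h]

theorem pvGetTag_eq_none_of_not_mem (tags : List (String × String)) (k : String)
    (h : k ∉ tags.map Prod.fst) : pvGetTag tags k = none := by
  have hfind : tags.find? (fun kv => kv.1 == k) = none := by
    rw [List.find?_eq_none]
    intro kv hkv
    simp only [beq_iff_eq]
    intro hk
    exact h (by simpa [hk] using List.mem_map_of_mem (f := Prod.fst) hkv)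
  simp [pvGetTag, hfind]

theorem contains_shop (v : String) :
    pvItems_is_catering_place.contains ("shop", v) = (["pastry", "bakery"].contains v) := by
  simp [pvItems_is_catering_place, Prod.ext_iff]

theorem contains_amenity (v : String) :
    pvItems_is_catering_place.contains ("amenity", v) =
      (["restaurant", "cafe", "fast_food", "bakery", "bar", "nightclub",
        "internet_cafe", "pub"].contains v) := by
  simp [pvItems_is_catering_place, Prod.ext_iff]

theorem contains_other (k v : String) (h1 : k ≠ "shop") (h2 : k ≠ "amenity") :
    pvItems_is_catering_place.contains (k, v) = false := by
  simp [pvItems_is_catering_place, Prod.ext_iff, h1, h2]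

theorem alt_unfold (tags : List (String × String)) :
    is_catering_place_alt tags =
      (pvInVals (pvGetTag tags "shop") ["pastry", "bakery"] ||
        pvInVals (pvGetTag tags "amenity")
          ["restaurant", "cafe", "fast_food", "bakery", "bar", "nightclub",
           "internet_cafe", "pub"]) := by
  simp [is_catering_place_alt, pvCatalogue_is_catering_place]

theorem a_cons (kv : String × String) (rest : List (String × String)) :
    is_catering_place (kv :: rest) =
      (pvItems_is_catering_place.contains kv || is_catering_place rest) := by
  simp [is_catering_place, pv_is_any_pair_present]

theorem alt_eq_a (tags : List (String × String)) (h : (tags.map Prod.fst).Nodup) :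
    is_catering_place_alt tags = is_catering_place tags := by
  induction tags with
  | nil => rfl
  | cons kv rest ih =>
    obtain ⟨k, v⟩ := kv
    simp only [List.map_cons, List.nodup_cons] at h
    obtain ⟨hknot, hnd⟩ := h
    have ihr := ih hnd
    rw [alt_unfold, a_cons, ← ihr, alt_unfold, pvGetTag_cons, pvGetTag_cons]
    by_cases hs : k = "shop"
    · subst hs
      rw [pvGetTag_eq_none_of_not_mem rest _ hknot, contains_shop]
      simp [pvInVals, Bool.or_assoc]
    · by_cases ha : k = "amenity"
      · subst ha
        rw [if_neg hs, if_pos rfl, pvGetTag_eq_none_of_not_mem rest _ hknot, contains_amenity]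
        generalize pvInVals (pvGetTag rest "shop") ["pastry", "bakery"] = b
        cases b <;> simp [pvInVals, Bool.or_left_comm, Bool.or_comm, Bool.or_assoc]
      · rw [contains_other k v hs ha]
        simp [hs, ha]

-- ===== VERDICT (by name: the statement is the Claim_ definition above) =====
theorem is_catering_place_spec : Claim_equal_is_catering_place := by
  intro tags _ hpre
  unfold Spec_is_catering_place
  exact (alt_eq_a tags hpre).symm
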